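-- pv_equiv track=rewrite | github.com/kylehench/Python-Public | algo-practice/120_longest_word.py | solution
-- ===== SOURCE A (Python) =====
-- def solution(text):
--   i_long, j_long = 0, 0
--   i, j = 0, 0
--   active = False
--   for idx, ch in enumerate(text):
--     if not active:
--       if ch.isalpha():
--         i = idx
--         active = True
--     if active:
--       if not ch.isalpha():
--         j = idx
--         active = False
--         if j-i > j_long-i_long:
--           i_long, j_long = i, j
--   if active:
--     j = len(text)
--     if j-i > j_long-i_long:
--       i_long, j_long = i, j
--   return text[i_long:j_long]
-- ===== SOURCE B (Python) =====
-- def _runs(chars):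
--     """Split chars into maximal runs of same .isalpha() category: [(key, run), ...]."""
--     runs = []
--     i, n = 0, len(chars)
--     while i < n:
--         k = chars[i].isalpha()
--         j = i + 1
--         while j < n and chars[j].isalpha() == k:
--             j += 1
--         runs.append((k, chars[i:j]))
--         i = j
--     return runs
--
--
-- def solution(text):
--     best = []
--     for k, g in _runs(list(text)):
--         if k and len(g) > len(best):
--             best = g
--     return ''.join(best)
-- ===== Notes on version B (the rewrite author's own statement) =====
-- stated objective: alternative
-- what changed: B first partitions the text into maximal runs of same isalpha-category characters (a groupby-style decomposition) and then scans the alphabetic runs keeping the first strictly longest, instead of A's single index-tracking state machine over enumerate with active/i/j bookkeeping and a final slice.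
import Mathlib
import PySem

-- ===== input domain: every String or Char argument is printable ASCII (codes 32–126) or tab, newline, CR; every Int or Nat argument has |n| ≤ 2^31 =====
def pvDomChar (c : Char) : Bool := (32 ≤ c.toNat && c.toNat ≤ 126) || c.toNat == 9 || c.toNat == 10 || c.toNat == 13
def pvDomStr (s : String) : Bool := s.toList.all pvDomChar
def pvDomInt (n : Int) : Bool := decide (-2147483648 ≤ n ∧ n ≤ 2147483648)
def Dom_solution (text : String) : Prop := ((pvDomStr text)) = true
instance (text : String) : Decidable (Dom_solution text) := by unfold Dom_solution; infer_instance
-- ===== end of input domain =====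

-- B replaces A's index-tracking state machine by a groupby-style decomposition into
-- maximal same-category runs followed by a scan keeping the first strictly longest; same cost.

-- ===== PORT A =====
-- loop body of A's 'for idx, ch in enumerate(text)'
def stepA (st : Int × Int × Int × Int × Bool) (p : Int × Char) : Int × Int × Int × Int × Bool :=
  let (ilong, jlong, i, j, active) := st
  let (idx, ch) := p
  -- if not active: if ch.isalpha(): i = idx; active = True
  let (i, active) :=
    if active = false then
      (if PySem.Chars.isalpha ch then (idx, true) else (i, active))
    else (i, active)
  -- if active: if not ch.isalpha(): j = idx; active = False; maybe update best
  if active then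
    if PySem.Chars.isalpha ch = false then
      let j := idx
      if j - i > jlong - ilong then (i, j, i, j, false) else (ilong, jlong, i, j, false)
    else (ilong, jlong, i, j, active)
  else (ilong, jlong, i, j, active)

def solution (text : String) : String :=
  let st := (PySem.List.enumerate text.toList 0).foldl stepA (0, 0, 0, 0, false)
  let (ilong, jlong, i, _j, active) := st
  let (ilong, jlong) :=
    if active then
      let j : Int := (text.toList.length : Int)   -- len(text)
      if j - i > jlong - ilong then (i, j) else (ilong, jlong)
    else (ilong, jlong)
  PySem.Str.slice text (some ilong) (some jlong)

-- ===== PORT B =====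
-- _runs: maximal runs of same isalpha-category (the inner while = takeWhile/dropWhile)
def runsB (chars : List Char) : List (Bool × List Char) :=
  match chars with
  | [] => []
  | head :: tail =>
    let k := PySem.Chars.isalpha head
    (k, head :: tail.takeWhile (fun c => PySem.Chars.isalpha c == k)) ::
      runsB (tail.dropWhile (fun c => PySem.Chars.isalpha c == k))
termination_by chars.length
decreasing_by
  simp only [List.length_cons]
  exact Nat.lt_succ_of_le (List.length_dropWhile_le _ _)

-- loop body of B's 'for k, g in _runs(...)'
def stepB (best : List Char) (p : Bool × List Char) : List Char :=
  if p.1 && decide (best.length < p.2.length) then p.2 else best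

def solution_alt (text : String) : String :=
  let best := (runsB text.toList).foldl stepB []
  String.ofList best

-- ===== PRECONDITION & SPEC =====
def Spec_solution (text : String) (out : String) : Prop := out = solution_alt text
instance (text : String) (out : String) : Decidable (Spec_solution text out) := by unfold Spec_solution; infer_instance

-- ===== CLAIM (what is proved, stated in full; the proofs are below) =====
def Claim_equal_solution : Prop := ∀ (text : String), Dom_solution text → Spec_solution text (solution text)

-- ===== LEMMAS AND PROOFS =====

-- A's post-loop finish: returns the final (i_long, j_long)
def finA (len : Int) (st : Int × Int × Int × Int × Bool) : Int × Int :=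
  let (ilong, jlong, i, _j, active) := st
  if active then
    (if len - i > jlong - ilong then (i, len) else (ilong, jlong))
  else (ilong, jlong)

lemma solution_eq_finA (text : String) :
    solution text =
      PySem.Str.slice text
        (some (finA (text.toList.length : Int)
          ((PySem.List.enumerate text.toList 0).foldl stepA (0, 0, 0, 0, false))).1)
        (some (finA (text.toList.length : Int)
          ((PySem.List.enumerate text.toList 0).foldl stepA (0, 0, 0, 0, false))).2) := by
  unfold solution finA
  rcases (PySem.List.enumerate text.toList 0).foldl stepA (0, 0, 0, 0, false) with
    ⟨il, jl, i, j, active⟩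
  cases active <;> simp

-- stepA on an inactive state and a non-alphabetic char: no change
lemma stepA_inactive_nonalpha (il jl i j : Int) (idx : Int) (c : Char)
    (hc : PySem.Chars.isalpha c = false) :
    stepA (il, jl, i, j, false) (idx, c) = (il, jl, i, j, false) := by
  simp [stepA, hc]

-- stepA on an inactive state and an alphabetic char: start a run
lemma stepA_inactive_alpha (il jl i j : Int) (idx : Int) (c : Char)
    (hc : PySem.Chars.isalpha c = true) :
    stepA (il, jl, i, j, false) (idx, c) = (il, jl, idx, j, true) := by
  simp [stepA, hc]

-- stepA on an active state and an alphabetic char: no change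
lemma stepA_active_alpha (il jl i j : Int) (idx : Int) (c : Char)
    (hc : PySem.Chars.isalpha c = true) :
    stepA (il, jl, i, j, true) (idx, c) = (il, jl, i, j, true) := by
  simp [stepA, hc]

-- folding stepA over an all-alphabetic list from an active state: no change
lemma foldA_active_alpha (g : List Char) (h : ∀ c ∈ g, PySem.Chars.isalpha c = true)
    (n il jl i j : Int) :
    (PySem.List.enumerate g n).foldl stepA (il, jl, i, j, true) = (il, jl, i, j, true) := by
  induction g generalizing n with
  | nil => simp [PySem.List.enumerate_nil]
  | cons c t ih =>
    rw [PySem.List.enumerate_cons, List.foldl_cons,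
      stepA_active_alpha _ _ _ _ _ _ (h c (by simp))]
    exact ih (fun c hc => h c (by simp [hc])) _

-- head of dropWhile fails the predicate
lemma head_dropWhile_false {p : Char → Bool} {l : List Char} {c : Char} {r : List Char}
    (h : l.dropWhile p = c :: r) : p c = false := by
  induction l with
  | nil => simp at h
  | cons a t ih =>
    by_cases hp : p a
    · rw [List.dropWhile_cons_of_pos hp] at h; exact ih h
    · rw [List.dropWhile_cons_of_neg hp] at h
      cases h; simpa using hp

-- B's fold ignores a leading non-alphabetic character
lemma foldB_cons_nonalpha (c : Char) (hc : PySem.Chars.isalpha c = false)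
    (u : List Char) (b : List Char) :
    (runsB (c :: u)).foldl stepB b = (runsB u).foldl stepB b := by
  rw [runsB]
  simp only [hc]
  rw [List.foldl_cons]
  have hstep : stepB b (false, c :: u.takeWhile (fun x => PySem.Chars.isalpha x == false)) = b := by
    simp [stepB]
  rw [hstep]
  cases u with
  | nil => simp [runsB]
  | cons d u' =>
    by_cases hd : PySem.Chars.isalpha d
    · rw [List.dropWhile_cons_of_neg (by simp [hd])]
    · rw [List.dropWhile_cons_of_pos (by simp [hd])]
      conv_rhs => rw [runsB]
      simp only [hd]
      rw [List.foldl_cons]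
      have : stepB b (false, d :: u'.takeWhile (fun x => PySem.Chars.isalpha x == false)) = b := by
        simp [stepB]
      rw [this]

-- stepA on an active state and a non-alphabetic char: close the run
lemma stepA_active_nonalpha (il jl i j idx : Int) (c : Char)
    (hc : PySem.Chars.isalpha c = false) :
    stepA (il, jl, i, j, true) (idx, c) =
      if idx - i > jl - il then (i, idx, i, idx, false) else (il, jl, i, idx, false) := by
  simp [stepA, hc]

lemma length_best (cs : List Char) (il jl : Nat) (h1 : il ≤ jl) (h2 : jl ≤ cs.length) :
    ((cs.drop il).take (jl - il)).length = jl - il := by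
  simp only [List.length_take, List.length_drop]
  omega

-- finA on an explicit state
lemma finA_active (len il jl i j : Int) :
    finA len (il, jl, i, j, true) = if len - i > jl - il then (i, len) else (il, jl) := by
  simp [finA]

lemma finA_inactive (len il jl i j : Int) :
    finA len (il, jl, i, j, false) = (il, jl) := by
  simp [finA]

lemma stepB_true_lt (b g : List Char) (h : b.length < g.length) : stepB b (true, g) = g := by
  unfold stepB
  rw [if_pos (show (true && decide (b.length < g.length)) = true by simp [h])]

lemma stepB_true_ge (b g : List Char) (h : ¬ b.length < g.length) : stepB b (true, g) = b := by
  unfold stepB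
  rw [if_neg (show ¬ ((true && decide (b.length < g.length)) = true) by simp [h])]

-- the main run-by-run invariant: processing any suffix l of cs (starting at index n) from an
-- inactive A-state whose recorded best is cs[il:jl] gives the same best as B's fold over runsB l
lemma mainA (cs : List Char) : ∀ (N : Nat) (l : List Char), l.length ≤ N →
    ∀ (n il jl : Nat) (i j : Int),
    cs.drop n = l → il ≤ jl → jl ≤ n → n + l.length = cs.length →
    ∃ il2 jl2 : Nat,
      finA (cs.length : Int)
          ((PySem.List.enumerate l n).foldl stepA ((il : Int), (jl : Int), i, j, false))
        = ((il2 : Int), (jl2 : Int)) ∧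
      il2 ≤ jl2 ∧ jl2 ≤ cs.length ∧
      (cs.drop il2).take (jl2 - il2) =
        (runsB l).foldl stepB ((cs.drop il).take (jl - il)) := by
  intro N
  induction N with
  | zero =>
    intro l hl n il jl i j hdrop hij hjn hlen
    have hnil : l = [] := List.eq_nil_of_length_eq_zero (Nat.le_zero.mp hl)
    subst hnil
    exact ⟨il, jl, by simp [PySem.List.enumerate_nil, finA_inactive], hij,
      by simp at hlen; omega, by simp [runsB]⟩
  | succ N ih =>
    intro l hl n il jl i j hdrop hij hjn hlen
    cases l with
    | nil =>
      exact ⟨il, jl, by simp [PySem.List.enumerate_nil, finA_inactive], hij,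
        by simp at hlen; omega, by simp [runsB]⟩
    | cons c t =>
      rw [PySem.List.enumerate_cons, List.foldl_cons]
      by_cases hc : PySem.Chars.isalpha c
      · -- alphabetic head: a maximal alphabetic run starts at index n
        rw [stepA_inactive_alpha _ _ _ _ _ _ hc]
        have hrunB : runsB (c :: t) =
            (true, c :: t.takeWhile (fun x => PySem.Chars.isalpha x)) ::
              runsB (t.dropWhile (fun x => PySem.Chars.isalpha x)) := by
          rw [runsB]; simp [hc]
        obtain ⟨u, hu⟩ : ∃ u, t.takeWhile (fun x => PySem.Chars.isalpha x) = u := ⟨_, rfl⟩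
        obtain ⟨r, hrr⟩ : ∃ r, t.dropWhile (fun x => PySem.Chars.isalpha x) = r := ⟨_, rfl⟩
        rw [hu, hrr] at hrunB
        have htw : u ++ r = t := by rw [← hu, ← hrr]; exact List.takeWhile_append_dropWhile
        have hall : ∀ x ∈ u, PySem.Chars.isalpha x = true := by
          intro x hx; rw [← hu] at hx; simpa using List.mem_takeWhile_imp hx
        have hsplit : PySem.List.enumerate t ((n : Int) + 1) =
            PySem.List.enumerate u ((n : Int) + 1) ++
            PySem.List.enumerate r ((n : Int) + 1 + u.length) := by
          conv_lhs => rw [← htw]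
          rw [PySem.List.enumerate_append]
        rw [hsplit, List.foldl_append, foldA_active_alpha u hall]
        have hdn : cs.drop n = c :: (u ++ r) := by rw [hdrop, htw]
        have hlt : t.length = u.length + r.length := by rw [← htw]; simp
        have hlen' : n + (1 + (u.length + r.length)) = cs.length := by
          simp only [List.length_cons] at hlen; omega
        have hbestlen : ((cs.drop il).take (jl - il)).length = jl - il :=
          length_best cs il jl hij (by omega)
        cases r with
        | nil =>
          -- the text ends inside the run: A's trailing if-active = B's last group
          simp only [List.append_nil] at hdn htw
          simp only [List.length_nil, Nat.add_zero] at hlen'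
          simp only [PySem.List.enumerate_nil, List.foldl_nil]
          rw [finA_active]
          by_cases hcond : jl - il < 1 + u.length
          · refine ⟨n, cs.length, ?_, by omega, le_rfl, ?_⟩
            · rw [if_pos (show (jl : Int) - (il : Int) < (cs.length : Int) - (n : Int) by omega)]
            · rw [hrunB, show runsB ([] : List Char) = [] from by rw [runsB]]
              simp only [List.foldl_cons, List.foldl_nil]
              rw [stepB_true_lt _ _ (by rw [hbestlen, List.length_cons]; omega)]
              rw [hdn, show cs.length - n = u.length + 1 from by omega, List.take_succ_cons,
                List.take_length]
          · refine ⟨il, jl, ?_, hij, by omega, ?_⟩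
            · rw [if_neg (show ¬ ((jl : Int) - (il : Int) < (cs.length : Int) - (n : Int)) by omega)]
            · rw [hrunB, show runsB ([] : List Char) = [] from by rw [runsB]]
              simp only [List.foldl_cons, List.foldl_nil]
              rw [stepB_true_ge _ _ (by rw [hbestlen, List.length_cons]; omega)]
        | cons c' r' =>
          -- the run is closed by the non-alphabetic character c'
          have hc' : PySem.Chars.isalpha c' = false := by
            simpa using head_dropWhile_false hrr
          rw [PySem.List.enumerate_cons, List.foldl_cons,
            stepA_active_nonalpha _ _ _ _ _ _ hc']
          simp only [List.length_cons] at hlt hlen'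
          have hrlen : r'.length ≤ N := by simp only [List.length_cons] at hl; omega
          have hdrop' : cs.drop (n + 1 + u.length + 1) = r' := by
            have h1 := congrArg (List.drop 1) hdn
            rw [List.drop_drop, List.drop_succ_cons] at h1
            simp only [List.drop_zero] at h1
            have h2 := congrArg (List.drop u.length) h1
            rw [List.drop_drop, List.drop_left] at h2
            have h3 := congrArg (List.drop 1) h2
            rw [List.drop_drop, List.drop_succ_cons] at h3
            simpa using h3
          have hlen'' : (n + 1 + u.length + 1) + r'.length = cs.length := by omega
          have hcu : (cs.drop n).take (1 + u.length) = c :: u := by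
            rw [hdn, show 1 + u.length = u.length + 1 from Nat.add_comm 1 u.length,
              List.take_succ_cons]
            congr 1
            rw [List.take_left]
          rw [show ((n : Int) + 1 + (u.length : Int)) = ((n + 1 + u.length : Nat) : Int) from by
            push_cast; ring]
          rw [show (((n + 1 + u.length : Nat) : Int) + 1) = ((n + 1 + u.length + 1 : Nat) : Int) from by
            push_cast; ring]
          by_cases hcond : jl - il < 1 + u.length
          · rw [if_pos (show (jl : Int) - (il : Int) <
                ((n + 1 + u.length : Nat) : Int) - (n : Int) from by push_cast; omega)]
            obtain ⟨il2, jl2, h1, h2, h3, h4⟩ :=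
              ih r' hrlen (n + 1 + u.length + 1) n (n + 1 + u.length) ((n : Nat) : Int)
                ((n + 1 + u.length : Nat) : Int) hdrop' (by omega) (by omega) hlen''
            refine ⟨il2, jl2, h1, h2, h3, ?_⟩
            rw [hrunB]
            simp only [List.foldl_cons]
            rw [stepB_true_lt _ _ (by rw [hbestlen, List.length_cons]; omega)]
            rw [foldB_cons_nonalpha c' hc' r' (c :: u)]
            rw [show n + 1 + u.length - n = 1 + u.length from by omega, hcu] at h4
            exact h4
          · rw [if_neg (show ¬ ((jl : Int) - (il : Int) <
                ((n + 1 + u.length : Nat) : Int) - (n : Int)) from by push_cast; omega)]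
            obtain ⟨il2, jl2, h1, h2, h3, h4⟩ :=
              ih r' hrlen (n + 1 + u.length + 1) il jl ((n : Nat) : Int)
                ((n + 1 + u.length : Nat) : Int) hdrop' hij (by omega) hlen''
            refine ⟨il2, jl2, h1, h2, h3, ?_⟩
            rw [hrunB]
            simp only [List.foldl_cons]
            rw [stepB_true_ge _ _ (by rw [hbestlen, List.length_cons]; omega)]
            rw [foldB_cons_nonalpha c' hc' r' _]
            exact h4
      · -- non-alphabetic head: both sides skip it
        have hc0 : PySem.Chars.isalpha c = false := by simpa using hc
        rw [stepA_inactive_nonalpha _ _ _ _ _ _ hc0]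
        have hdrop' : cs.drop (n + 1) = t := by
          have h := congrArg (List.drop 1) hdrop
          rw [List.drop_drop, List.drop_succ_cons] at h
          simpa using h
        have hlen' : (n + 1) + t.length = cs.length := by
          simp only [List.length_cons] at hlen; omega
        obtain ⟨il2, jl2, h1, h2, h3, h4⟩ :=
          ih t (by simp only [List.length_cons] at hl; omega) (n + 1) il jl i j
            hdrop' hij (by omega) hlen'
        refine ⟨il2, jl2, ?_, h2, h3, ?_⟩
        · rw [show ((n : Int) + 1) = ((n + 1 : Nat) : Int) from by push_cast; ring]
          exact h1
        · rw [foldB_cons_nonalpha c hc0 t]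
          exact h4

-- ===== VERDICT (by name: the statement is the Claim_ definition above) =====
theorem solution_spec : Claim_equal_solution := by
  intro text hdom
  unfold Spec_solution
  rw [solution_eq_finA]
  obtain ⟨il2, jl2, h1, h2, h3, h4⟩ :=
    mainA text.toList text.toList.length text.toList le_rfl 0 0 0 0 0 rfl le_rfl le_rfl (by simp)
  simp only [Nat.cast_zero] at h1
  rw [h1]
  simp only [List.drop_zero, Nat.sub_zero, List.take_zero] at h4
  show String.ofList (PySem.Chars.slice text.toList (some (il2 : Int)) (some (jl2 : Int))) = _
  rw [show solution_alt text = String.ofList ((runsB text.toList).foldl stepB []) from rfl]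
  congr 1
  rw [PySem.Chars.slice_eq_listSlice, PySem.List.slice_natCast]
  exact h4
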